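-- pv_equiv track=rewrite | github.com/whyhardt/SPICE | spice/resources/sindy_differentiable.py | get_library_feature_names
-- ===== SOURCE A (Python) =====
-- from typing import List, Tuple, Iterable
-- from itertools import combinations_with_replacement
--
-- def get_library_feature_names(feature_names: List[str], degree: int) -> List[str]:
--     """
--     Generate feature names for polynomial library terms.
--
--     Args:
--         feature_names: Names of input features
--         degree: Maximum polynomial degree
--
--     Returns:
--         List of library term names (e.g., ['1', 'x', 'x^2', 'x*u', ...])
--     """
--     n_features = len(feature_names)
--     library_names = []
--
--     for d in range(degree + 1):
--         for combo in combinations_with_replacement(range(n_features), d):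
--             if len(combo) == 0:
--                 library_names.append('1')
--             else:
--                 term_parts = []
--                 feature_counts = {}
--                 for idx in combo:
--                     feature_counts[idx] = feature_counts.get(idx, 0) + 1
--
--                 for idx, count in sorted(feature_counts.items()):
--                     if count == 1:
--                         term_parts.append(feature_names[idx])
--                     else:
--                         term_parts.append(f"{feature_names[idx]}^{count}")
--
--                 library_names.append('*'.join(term_parts))
--
--     return library_names
-- ===== SOURCE B (Python) =====
-- def get_library_feature_names(feature_names, degree):
--     """Recursive exponent assignment: for each feature in turn choose its count
--     (from high to low, matching combinations_with_replacement's lexicographic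
--     order), formatting the term parts directly without dicts or sorting."""
--     def emit(names, rem, parts):
--         if not names:
--             return ([('*'.join(parts) if parts else '1')] if rem == 0 else [])
--         name, rest = names[0], names[1:]
--         out = []
--         for c in range(rem, -1, -1):
--             if c == 0:
--                 out += emit(rest, rem, parts)
--             elif c == 1:
--                 out += emit(rest, rem - 1, parts + [name])
--             else:
--                 out += emit(rest, rem - c, parts + [f"{name}^{c}"])
--         return out
--
--     result = []
--     for d in range(degree + 1):
--         result += emit(feature_names, d, [])
--     return result
-- ===== Notes on version B (the rewrite author's own statement) =====
-- stated objective: alternative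
-- what changed: Replaces the itertools combinations_with_replacement enumeration plus per-term dict counting and sorting with a recursive helper that assigns an exponent to each feature in turn (counts high-to-low), formatting each term part directly as it recurses.
import Mathlib
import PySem

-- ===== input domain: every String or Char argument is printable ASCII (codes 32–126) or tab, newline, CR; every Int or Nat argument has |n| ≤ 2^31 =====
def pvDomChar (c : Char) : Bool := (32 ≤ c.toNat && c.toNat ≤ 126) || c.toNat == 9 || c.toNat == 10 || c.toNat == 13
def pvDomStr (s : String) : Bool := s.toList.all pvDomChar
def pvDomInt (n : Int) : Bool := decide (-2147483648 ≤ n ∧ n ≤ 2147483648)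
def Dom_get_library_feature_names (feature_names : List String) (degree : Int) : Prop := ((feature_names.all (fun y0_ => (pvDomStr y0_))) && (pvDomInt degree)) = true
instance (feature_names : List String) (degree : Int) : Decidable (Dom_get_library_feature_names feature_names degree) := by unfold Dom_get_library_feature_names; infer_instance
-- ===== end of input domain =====

-- B replaces the combinations_with_replacement enumeration + per-term dict counting/sorting
-- by a recursive helper assigning each feature's exponent in turn (alternative decomposition).


-- ===== PORT A =====
-- itertools.combinations_with_replacement(pool, d), ported by hand as its standard
-- recursive characterisation (lexicographic by pool positions, repeats allowed); exact
-- for a pool given as a list.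
def pvCwr : Nat → List α → List (List α)
  | 0, _ => [[]]
  | _ + 1, [] => []
  | d + 1, x :: rest => (pvCwr d (x :: rest)).map (x :: ·) ++ pvCwr (d + 1) rest
termination_by d pool => (d, pool.length)

def get_library_feature_names (feature_names : List String) (degree : Int) : List String :=
  let n_features : Int := feature_names.length
  (PySem.List.pyRange 0 (degree + 1) 1).foldl (fun library_names d =>
    -- d from range(degree+1) is nonnegative, so d.toNat is exactly the Python int d
    (pvCwr d.toNat (PySem.List.pyRange 0 n_features 1)).foldl (fun library_names combo =>
      if combo.length = 0 then
        library_names ++ ["1"]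
      else
        let feature_counts := combo.foldl
          (fun fc idx => fc.insert idx (fc.getD idx 0 + 1)) (PySem.Dict.empty)
        let term_parts := (PySem.List.sorted2 feature_counts.items (·.1) (·.2)).foldl
          (fun term_parts p =>
            if p.2 = 1 then term_parts ++ [PySem.List.pyGetD feature_names p.1 ""]
            else term_parts ++ [PySem.List.pyGetD feature_names p.1 "" ++ "^" ++ PySem.Int.toStr p.2])
          []
        library_names ++ [PySem.Str.join "*" term_parts]) library_names) []

-- ===== PORT B =====
def pvEmit : List String → Int → List String → List String
  | [], rem, parts => if rem = 0 then [if parts = [] then "1" else PySem.Str.join "*" parts] else []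
  | name :: rest, rem, parts =>
    (PySem.List.pyRange rem (-1) (-1)).foldl (fun out c =>
      if c = 0 then out ++ pvEmit rest rem parts
      else if c = 1 then out ++ pvEmit rest (rem - 1) (parts ++ [name])
      else out ++ pvEmit rest (rem - c) (parts ++ [name ++ "^" ++ PySem.Int.toStr c])) []

def get_library_feature_names_alt (feature_names : List String) (degree : Int) : List String :=
  (PySem.List.pyRange 0 (degree + 1) 1).foldl (fun result d =>
    result ++ pvEmit feature_names d []) []

-- ===== PRECONDITION & SPEC =====
def Spec_get_library_feature_names (feature_names : List String) (degree : Int) (out : List String) : Prop := out = get_library_feature_names_alt feature_names degree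
instance (feature_names : List String) (degree : Int) (out : List String) : Decidable (Spec_get_library_feature_names feature_names degree out) := by unfold Spec_get_library_feature_names; infer_instance

-- ===== CLAIM (what is proved, stated in full; the proofs are below) =====
def Claim_equal_get_library_feature_names : Prop := ∀ (feature_names : List String) (degree : Int), Dom_get_library_feature_names feature_names degree → Spec_get_library_feature_names feature_names degree (get_library_feature_names feature_names degree)


-- ===== LEMMAS AND PROOFS =====

-- formatting of one (index, count) item, exactly as A's inner loop does it
def pvFmtIdx (names : List String) (p : Int × Int) : String :=
  if p.2 = 1 then PySem.List.pyGetD names p.1 ""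
  else PySem.List.pyGetD names p.1 "" ++ "^" ++ PySem.Int.toStr p.2

-- the parts list a combo denotes (counter items, formatted)
def pvPartsA (names : List String) (combo : List Int) : List String :=
  (PySem.Dict.counter combo).items.map (pvFmtIdx names)

def pvJoinOr1 (ps : List String) : String :=
  if ps = [] then "1" else PySem.Str.join "*" ps

theorem pvSorted2_eq_self_aux (l : List (Int × Int)) :
    ∀ acc : List (Int × Int), (∀ y ∈ acc, ∀ x ∈ l, y.1 < x.1) →
      l.Pairwise (fun a b => a.1 < b.1) →
      l.foldl (fun acc x => PySem.List.insertBy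
        (fun a b => decide (a.1 < b.1) || !decide (b.1 < a.1) && decide (a.2 < b.2)) x acc) acc
        = acc ++ l := by
  induction l with
  | nil => intro acc _ _; simp
  | cons x l ih =>
    intro acc hacc hpw
    have hins : PySem.List.insertBy
        (fun a b => decide (a.1 < b.1) || !decide (b.1 < a.1) && decide (a.2 < b.2)) x acc
        = acc ++ [x] := by
      apply PySem.List.insertBy_of_forall_not_before
      intro y hy
      have h1 : y.1 < x.1 := hacc y hy x (by simp)
      have h2 : ¬ x.1 < y.1 := by omega
      simp [h1, h2]
    rw [List.foldl_cons, hins, ih (acc ++ [x]) ?_ (List.Pairwise.of_cons hpw)]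
    · simp
    · intro y hy z hz
      rcases List.mem_append.mp hy with h | h
      · exact hacc y h z (List.mem_cons_of_mem _ hz)
      · simp at h; subst h
        exact (List.pairwise_cons.mp hpw).1 z hz

theorem pvSorted2_eq_self (l : List (Int × Int))
    (h : l.Pairwise (fun a b => a.1 < b.1)) :
    PySem.List.sorted2 l (·.1) (·.2) = l := by
  have := pvSorted2_eq_self_aux l [] (by simp) h
  simpa [PySem.List.sorted2] using this

theorem pvCwr_subset : (d : Nat) → (pool combo : List Int) → combo ∈ pvCwr d pool →
    ∀ y ∈ combo, y ∈ pool
  | 0, pool, combo, hc => by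
      simp [pvCwr] at hc; subst hc; simp
  | d + 1, [], combo, hc => by
      simp [pvCwr] at hc
  | d + 1, x :: rest, combo, hc => by
      rw [pvCwr] at hc
      rcases List.mem_append.mp hc with h | h
      · rcases List.mem_map.mp h with ⟨t, ht, rfl⟩
        intro y hy
        rcases List.mem_cons.mp hy with rfl | hy
        · simp
        · exact pvCwr_subset d (x :: rest) t ht y hy
      · intro y hy
        exact List.mem_cons_of_mem _ (pvCwr_subset (d + 1) rest combo h y hy)
termination_by d pool => (d, pool.length)

theorem pvCwr_pairwise : (d : Nat) → (pool combo : List Int) → pool.Pairwise (· ≤ ·) →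
    combo ∈ pvCwr d pool → combo.Pairwise (· ≤ ·)
  | 0, pool, combo, hp, hc => by
      simp [pvCwr] at hc; subst hc; simp
  | d + 1, [], combo, hp, hc => by
      simp [pvCwr] at hc
  | d + 1, x :: rest, combo, hp, hc => by
      rw [pvCwr] at hc
      rcases List.mem_append.mp hc with h | h
      · rcases List.mem_map.mp h with ⟨t, ht, rfl⟩
        refine List.pairwise_cons.mpr ⟨?_, pvCwr_pairwise d (x :: rest) t hp ht⟩
        intro y hy
        rcases List.mem_cons.mp (pvCwr_subset d (x :: rest) t ht y hy) with rfl | hy'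
        · exact le_refl y
        · exact (List.pairwise_cons.mp hp).1 y hy'
      · exact pvCwr_pairwise (d + 1) rest combo (List.Pairwise.of_cons hp) h
termination_by d pool => (d, pool.length)

theorem pvCwr_group (x : Int) (pool : List Int) : ∀ r : Nat,
    pvCwr r (x :: pool) = (List.range (r + 1)).flatMap
      (fun k => (pvCwr k pool).map (fun t => List.replicate (r - k) x ++ t)) := by
  intro r
  induction r with
  | zero => simp [pvCwr]
  | succ r ih =>
    rw [pvCwr, ih]
    conv_rhs => rw [List.range_succ]
    rw [List.flatMap_append, List.map_flatMap]
    simp only [List.flatMap_cons, List.flatMap_nil, List.append_nil, Nat.sub_self,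
      List.replicate_zero, List.nil_append, List.map_map]
    congr 1
    · refine List.flatMap_congr ?_
      intro k hk
      have hk' : k ≤ r := Nat.lt_succ_iff.mp (List.mem_range.mp hk)
      refine List.map_congr_left ?_
      intro t _
      show x :: (List.replicate (r - k) x ++ t) = List.replicate (r + 1 - k) x ++ t
      have he : r + 1 - k = (r - k) + 1 := by omega
      rw [he, List.replicate_succ]
      simp
    · exact (List.map_id _).symm

-- first occurrences: Set.ofList is a subsequence of its argument
theorem pvFoldlAdd_sublist (xs : List Int) : ∀ s : List Int,
    ∃ t, List.foldl PySem.Set.add s xs = s ++ t ∧ t.Sublist xs := by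
  induction xs with
  | nil => intro s; exact ⟨[], by simp⟩
  | cons x xs ih =>
    intro s
    rw [List.foldl_cons]
    by_cases h : PySem.Set.contains s x = true
    · have hadd : PySem.Set.add s x = s := by unfold PySem.Set.add; rw [if_pos h]
      rw [hadd]
      obtain ⟨t, ht, hs⟩ := ih s
      exact ⟨t, ht, hs.cons x⟩
    · have hadd : PySem.Set.add s x = s ++ [x] := by unfold PySem.Set.add; rw [if_neg h]
      rw [hadd]
      obtain ⟨t, ht, hs⟩ := ih (s ++ [x])
      exact ⟨x :: t, by simpa using ht, hs.cons₂ x⟩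

theorem pvOfList_pairwise_lt (xs : List Int) (h : xs.Pairwise (· ≤ ·)) :
    (PySem.Set.ofList xs).Pairwise (· < ·) := by
  obtain ⟨t, ht, hs⟩ := pvFoldlAdd_sublist xs []
  have heq : PySem.Set.ofList xs = t := by simpa [PySem.Set.ofList, PySem.Set.empty] using ht
  have hle : (PySem.Set.ofList xs).Pairwise (· ≤ ·) := by
    rw [heq]; exact List.Pairwise.sublist hs h
  have hnd : (PySem.Set.ofList xs).Pairwise (· ≠ ·) := PySem.Set.nodup_ofList xs
  exact (hle.and hnd).imp (fun h => lt_of_le_of_ne h.1 h.2)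

theorem pvFoldlAdd_cons_notmem (ys : List Int) : ∀ (s : List Int) (x : Int), x ∉ ys →
    List.foldl PySem.Set.add (x :: s) ys = x :: List.foldl PySem.Set.add s ys := by
  induction ys with
  | nil => intro s x _; simp
  | cons y ys ih =>
    intro s x hx
    have hyx : ¬ y = x := fun e => hx (by simp [e])
    have hstep : PySem.Set.add (x :: s) y = x :: PySem.Set.add s y := by
      by_cases hm : y ∈ s
      · simp [PySem.Set.add, PySem.Set.contains, hyx, hm]
      · simp [PySem.Set.add, PySem.Set.contains, hyx, hm]
    rw [List.foldl_cons, hstep, List.foldl_cons]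
    exact ih (PySem.Set.add s y) x (fun h => hx (List.mem_cons_of_mem _ h))

theorem pvFoldlAdd_replicate_self (c : Nat) (x : Int) :
    List.foldl PySem.Set.add [x] (List.replicate c x) = [x] := by
  induction c with
  | zero => simp
  | succ c ih =>
    rw [List.replicate_succ, List.foldl_cons]
    have : PySem.Set.add [x] x = [x] := by simp [PySem.Set.add, PySem.Set.contains]
    rw [this, ih]

theorem pvOfList_replicate_append (c : Nat) (x : Int) (ys : List Int)
    (hc : 1 ≤ c) (hx : x ∉ ys) :
    PySem.Set.ofList (List.replicate c x ++ ys) = x :: PySem.Set.ofList ys := by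
  obtain ⟨c, rfl⟩ : ∃ c', c = c' + 1 := ⟨c - 1, by omega⟩
  show List.foldl PySem.Set.add PySem.Set.empty _ = _
  rw [List.replicate_succ, List.cons_append, List.foldl_cons]
  have h1 : PySem.Set.add PySem.Set.empty x = [x] := by
    simp [PySem.Set.add, PySem.Set.empty, PySem.Set.contains]
  rw [h1, List.foldl_append, pvFoldlAdd_replicate_self,
    pvFoldlAdd_cons_notmem ys [] x hx]
  rfl

theorem pvPartsA_nil (names : List String) : pvPartsA names [] = [] := rfl

theorem pvPartsA_ne_nil (names : List String) (combo : List Int) (h : combo ≠ []) :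
    pvPartsA names combo ≠ [] := by
  obtain ⟨x, rest, rfl⟩ := List.exists_cons_of_ne_nil h
  unfold pvPartsA
  rw [PySem.Dict.items_counter]
  have hx : x ∈ PySem.Set.ofList (x :: rest) := (PySem.Set.mem_ofList _ x).mpr (by simp)
  intro hcon
  simp only [List.map_eq_nil_iff, List.map_eq_nil_iff] at hcon
  rw [hcon] at hx
  simp at hx

theorem pvPartsA_replicate_append (names : List String) (c : Nat) (x : Int)
    (combo : List Int) (hc : 1 ≤ c) (hx : x ∉ combo) :
    pvPartsA names (List.replicate c x ++ combo)
      = pvFmtIdx names (x, (c : Int)) :: pvPartsA names combo := by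
  unfold pvPartsA
  rw [PySem.Dict.items_counter, PySem.Dict.items_counter,
    pvOfList_replicate_append c x combo hc hx]
  rw [List.map_cons, List.map_cons]
  congr 1
  · have h1 : List.count x (List.replicate c x ++ combo) = c := by
      rw [List.count_append, List.count_replicate_self, List.count_eq_zero_of_not_mem hx]
      omega
    simp [h1]
  · rw [List.map_map, List.map_map]
    refine List.map_congr_left ?_
    intro k hk
    have hk' : k ∈ combo := (PySem.Set.mem_ofList _ k).mp hk
    have hkx : k ≠ x := fun e => hx (e ▸ hk')
    have hxk : x ≠ k := Ne.symm hkx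
    simp [List.count_replicate, hxk]

-- A's per-combo processing, as one function of the combo
def pvGA (names : List String) (combo : List Int) : String :=
  if combo.length = 0 then "1"
  else
    let feature_counts := combo.foldl
      (fun fc idx => fc.insert idx (fc.getD idx 0 + 1)) (PySem.Dict.empty)
    let term_parts := (PySem.List.sorted2 feature_counts.items (·.1) (·.2)).foldl
      (fun term_parts p =>
        if p.2 = 1 then term_parts ++ [PySem.List.pyGetD names p.1 ""]
        else term_parts ++ [PySem.List.pyGetD names p.1 "" ++ "^" ++ PySem.Int.toStr p.2])
      []
    PySem.Str.join "*" term_parts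

-- A's per-combo processing equals pvJoinOr1 ∘ pvPartsA on a non-decreasing combo
theorem pvGA_eq (names : List String) (combo : List Int) (hpw : combo.Pairwise (· ≤ ·)) :
    pvGA names combo = pvJoinOr1 (pvPartsA names combo) := by
  unfold pvGA
  rcases combo with _ | ⟨x, rest⟩
  · simp [pvPartsA_nil, pvJoinOr1]
  · rw [if_neg (by simp)]
    have hne := pvPartsA_ne_nil names (x :: rest) (by simp)
    rw [pvJoinOr1, if_neg hne]
    rw [PySem.Dict.foldl_insert_getD_add_one_eq_counter]
    dsimp only
    have hsorted : PySem.List.sorted2 (PySem.Dict.counter (x :: rest)).items (·.1) (·.2)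
        = (PySem.Dict.counter (x :: rest)).items := by
      apply pvSorted2_eq_self
      rw [PySem.Dict.items_counter]
      have := pvOfList_pairwise_lt (x :: rest) hpw
      exact List.Pairwise.map _ (by intro a b h; simpa using h) this
    rw [hsorted]
    congr 1
    have : ((PySem.Dict.counter (x :: rest)).items).foldl
        (fun term_parts p =>
          if p.2 = 1 then term_parts ++ [PySem.List.pyGetD names p.1 ""]
          else term_parts ++ [PySem.List.pyGetD names p.1 "" ++ "^" ++ PySem.Int.toStr p.2])
        [] = ((PySem.Dict.counter (x :: rest)).items).map (pvFmtIdx names) := by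
      have hb : (fun (term_parts : List String) (p : Int × Int) =>
          if p.2 = 1 then term_parts ++ [PySem.List.pyGetD names p.1 ""]
          else term_parts ++ [PySem.List.pyGetD names p.1 "" ++ "^" ++ PySem.Int.toStr p.2])
          = fun term_parts p => term_parts ++ [pvFmtIdx names p] := by
        funext tp p; unfold pvFmtIdx; split_ifs <;> rfl
      rw [hb, PySem.List.foldl_append_singleton_eq_map]
      simp
    rw [this]
    rfl

-- the heart: B's recursive emitter enumerates exactly A's combos, formatted
theorem pvEmit_eq (names : List String) : ∀ (rest : List String) (i : Nat),
    names.drop i = rest → ∀ (r : Nat) (parts : List String),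
    pvEmit rest (r : Int) parts
      = (pvCwr r (PySem.List.pyRange i (i + rest.length) 1)).map
          (fun combo => pvJoinOr1 (parts ++ pvPartsA names combo)) := by
  intro rest
  induction rest with
  | nil =>
    intro i _ r parts
    rw [PySem.List.pyRange_one_eq_nil (by simp)]
    rcases r with _ | r
    · simp [pvEmit, pvCwr, pvPartsA_nil, pvJoinOr1]
    · have : ((r : Int) + 1) ≠ 0 := by omega
      simp only [pvEmit, pvCwr, Nat.cast_succ]
      rw [if_neg (by exact_mod_cast this)]
      simp
  | cons name rest' ih =>
    intro i hdrop r parts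
    have hname : PySem.List.pyGetD names (i : Int) "" = name := by
      rw [PySem.List.pyGetD_of_nonneg names "" (by positivity)]
      have : names[i]? = some name := by
        rw [← List.head?_drop, hdrop]; rfl
      simp [List.getD, this, Int.toNat_natCast]
    have hdrop' : names.drop (i + 1) = rest' := by
      rw [← List.drop_drop, hdrop]; rfl
    -- B's loop as a flatMap over k = r - c
    rw [pvEmit]
    have hbody : (fun (out : List String) (c : Int) =>
        if c = 0 then out ++ pvEmit rest' (r : Int) parts
        else if c = 1 then out ++ pvEmit rest' ((r : Int) - 1) (parts ++ [name])
        else out ++ pvEmit rest' ((r : Int) - c) (parts ++ [name ++ "^" ++ PySem.Int.toStr c]))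
        = fun out c => out ++
            (if c = 0 then pvEmit rest' (r : Int) parts
             else if c = 1 then pvEmit rest' ((r : Int) - 1) (parts ++ [name])
             else pvEmit rest' ((r : Int) - c) (parts ++ [name ++ "^" ++ PySem.Int.toStr c])) := by
      funext out c; split_ifs <;> rfl
    rw [hbody, PySem.List.foldl_append_eq_flatMap, PySem.List.pyRange_neg_one]
    have hlen : ((r : Int) - (-1)).toNat = r + 1 := by omega
    rw [hlen, List.flatMap_map, List.nil_append]
    -- A's combos, grouped by the multiplicity of the first feature
    have hpool : PySem.List.pyRange (i : Int) ((i : Int) + (name :: rest').length) 1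
        = (i : Int) :: PySem.List.pyRange ((i + 1 : Nat) : Int)
            (((i + 1 : Nat) : Int) + rest'.length) 1 := by
      have hlt : (i : Int) < (i : Int) + ((name :: rest').length : Int) := by
        simp only [List.length_cons]; push_cast; omega
      rw [PySem.List.pyRange_one_cons hlt]
      have e1 : (i : Int) + 1 = ((i + 1 : Nat) : Int) := by push_cast; ring
      have e2 : (i : Int) + ((name :: rest').length : Int)
          = ((i + 1 : Nat) : Int) + rest'.length := by
        simp only [List.length_cons]; push_cast; ring
      rw [e1, e2]
    rw [hpool, pvCwr_group, List.map_flatMap]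
    refine List.flatMap_congr ?_
    intro k hk
    have hk' : k ≤ r := Nat.lt_succ_iff.mp (List.mem_range.mp hk)
    have ihk := ih (i + 1) hdrop' k
    -- i is below every element of a combo over the tail pool
    have hnotmem : ∀ t ∈ pvCwr k (PySem.List.pyRange ((i + 1 : Nat) : Int)
        (((i + 1 : Nat) : Int) + rest'.length) 1), (i : Int) ∉ t := by
      intro t ht hmem
      have hy := pvCwr_subset k _ t ht _ hmem
      have h2 := (PySem.List.mem_pyRange_one.mp hy).1
      push_cast at h2
      omega
    rw [List.map_map]
    rcases Nat.lt_or_ge k r with hkr | hkr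
    · -- c = r - k ≥ 1 : the first feature occurs, with exponent r - k
      have hc1 : 1 ≤ r - k := by omega
      have hcne : ¬ ((r : Int) - k = 0) := by omega
      rw [if_neg hcne]
      have hrk : (r : Int) - k = ((r - k : Nat) : Int) := by omega
      by_cases h1 : r - k = 1
      · have hone : ((r : Int) - k = 1) := by omega
        rw [if_pos hone]
        have hrw : (r : Int) - 1 = (k : Int) := by omega
        rw [hrw, ihk (parts ++ [name])]
        refine List.map_congr_left ?_
        intro t ht
        have hnm : (i : Int) ∉ t := hnotmem t ht
        rw [Function.comp_apply,
          pvPartsA_replicate_append names (r - k) (i : Int) t hc1 hnm]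
        have hfmt : pvFmtIdx names ((i : Int), ((r - k : Nat) : Int)) = name := by
          rw [pvFmtIdx]
          have : ((r - k : Nat) : Int) = 1 := by omega
          rw [this, if_pos rfl, hname]
        rw [hfmt]
        simp
      · have hone : ¬ ((r : Int) - k = 1) := by omega
        rw [if_neg hone]
        have hrw : (r : Int) - ((r : Int) - k) = (k : Int) := by ring
        rw [hrw, ihk (parts ++ [name ++ "^" ++ PySem.Int.toStr ((r : Int) - k)])]
        refine List.map_congr_left ?_
        intro t ht
        have hnm : (i : Int) ∉ t := hnotmem t ht
        rw [Function.comp_apply,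
          pvPartsA_replicate_append names (r - k) (i : Int) t hc1 hnm]
        have hfmt : pvFmtIdx names ((i : Int), ((r - k : Nat) : Int))
            = name ++ "^" ++ PySem.Int.toStr ((r : Int) - k) := by
          rw [pvFmtIdx]
          have hne1 : ¬ (((r - k : Nat) : Int) = 1) := by omega
          rw [if_neg hne1, hname, hrk]
        rw [hfmt, hrk]
        simp
    · -- k = r : the first feature is skipped (exponent 0)
      have hkr' : k = r := by omega
      subst hkr'
      rw [if_pos (by omega)]
      rw [ihk parts]
      refine List.map_congr_left ?_
      intro t _
      rw [Function.comp_apply, Nat.sub_self, List.replicate_zero, List.nil_append]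


-- ===== VERDICT (by name: the statement is the Claim_ definition above) =====
theorem pvGA_foldl (names : List String) (cs : List (List Int)) (lib : List String) :
    cs.foldl (fun library_names combo =>
      if combo.length = 0 then library_names ++ ["1"]
      else
        let feature_counts := combo.foldl
          (fun fc idx => fc.insert idx (fc.getD idx 0 + 1)) (PySem.Dict.empty)
        let term_parts := (PySem.List.sorted2 feature_counts.items (·.1) (·.2)).foldl
          (fun term_parts p =>
            if p.2 = 1 then term_parts ++ [PySem.List.pyGetD names p.1 ""]
            else term_parts ++ [PySem.List.pyGetD names p.1 "" ++ "^" ++ PySem.Int.toStr p.2])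
          []
        library_names ++ [PySem.Str.join "*" term_parts]) lib
    = lib ++ cs.map (pvGA names) := by
  have hb : (fun (library_names : List String) (combo : List Int) =>
      if combo.length = 0 then library_names ++ ["1"]
      else
        let feature_counts := combo.foldl
          (fun fc idx => fc.insert idx (fc.getD idx 0 + 1)) (PySem.Dict.empty)
        let term_parts := (PySem.List.sorted2 feature_counts.items (·.1) (·.2)).foldl
          (fun term_parts p =>
            if p.2 = 1 then term_parts ++ [PySem.List.pyGetD names p.1 ""]
            else term_parts ++ [PySem.List.pyGetD names p.1 "" ++ "^" ++ PySem.Int.toStr p.2])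
          []
        library_names ++ [PySem.Str.join "*" term_parts])
      = fun library_names combo => library_names ++ [pvGA names combo] := by
    funext l c
    unfold pvGA
    split_ifs <;> rfl
  rw [hb, PySem.List.foldl_append_singleton_eq_map]

theorem get_library_feature_names_spec : Claim_equal_get_library_feature_names := by
  intro names degree _
  show get_library_feature_names names degree = get_library_feature_names_alt names degree
  unfold get_library_feature_names get_library_feature_names_alt
  simp only [pvGA_foldl]
  rw [PySem.List.foldl_append_eq_flatMap, PySem.List.foldl_append_eq_flatMap,
    List.nil_append, List.nil_append]
  refine List.flatMap_congr ?_
  intro d hd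
  have hd0 : 0 ≤ d := (PySem.List.mem_pyRange_one.mp hd).1
  have hdt : ((d.toNat : Nat) : Int) = d := Int.toNat_of_nonneg hd0
  have hB := pvEmit_eq names names 0 (by simp) d.toNat []
  rw [← hdt, hB]
  have hpool : PySem.List.pyRange ((0 : Nat) : Int) (((0 : Nat) : Int) + names.length) 1
      = PySem.List.pyRange 0 (names.length : Int) 1 := by norm_num
  rw [hpool]
  refine List.map_congr_left ?_
  intro combo hc
  have hpw : combo.Pairwise (· ≤ ·) :=
    pvCwr_pairwise d.toNat _ combo
      ((PySem.List.pairwise_lt_pyRange_one 0 (names.length : Int)).imp le_of_lt) hc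
  rw [pvGA_eq names combo hpw]
  simp
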